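-- pv_equiv track=rewrite | github.com/mouredev/retos-programacion-2023 | Retos/Reto #15 - AUREBESH [Fácil]/python/Lemito66.py | spanish_to_aurebesh
-- ===== SOURCE A (Python) =====
-- def spanish_to_aurebesh(text: str) -> str:
--     response = ''
--     double_aurebesh = {
--         'ch': 'cherek',
--         'ae': 'enth',
--         'eo': 'onith',
--         'kh': 'krenth',
--         'ng': 'nen',
--         'oo': 'orenth',
--         'sh': 'shen',
--         'th': 'thesh',
--     }
--     dictionary_aurebesh = {
--         'a': 'aurek',
--         'b': 'besh',
--         'c': 'cresh',
--         'd': 'dorn',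
--         'e': 'esk',
--         'f': 'forn',
--         'g': 'grek',
--         'h': 'herf',
--         'i': 'isk',
--         'j': 'jenth',
--         'k': 'krill',
--         'l': 'leth',
--         'm': 'mern',
--         'n': 'nern',
--         'o': 'osk',
--         'p': 'peth',
--         'q': 'qek',
--         'r': 'resh',
--         's': 'senth',
--         't': 'trill',
--         'u': 'usk',
--         'v': 'vev',
--         'w': 'wesk',
--         'x': 'xesh',
--         'y': 'yirt',
--         'z': 'zerek',
--     }
--
--     position_of_word = 0
--     text_to_lower = text.lower()
--     while position_of_word < len(text_to_lower):
--         # Verifica si los dos caracteres que empiezan en el índice actual están en el diccionario double_aurebesh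
--         if position_of_word < len(text_to_lower) - 1 and text_to_lower[position_of_word:position_of_word+2] in double_aurebesh:
--             response += double_aurebesh[text_to_lower[position_of_word:position_of_word+2]]
--             position_of_word += 2
--         # Si no, verifica si el carácter actual está en el diccionario dictionary_aurebesh y agrega su valor a la respuesta
--         elif text_to_lower[position_of_word] in dictionary_aurebesh:
--             response += dictionary_aurebesh[text_to_lower[position_of_word]]
--             position_of_word += 1
--         # Si no, agrega el carácter original a la respuesta
--         else:
--             response += text_to_lower[position_of_word]
--             position_of_word += 1
--
--     return response
-- ===== SOURCE B (Python) =====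
-- def spanish_to_aurebesh(text: str) -> str:
--     # digraph table keyed by FIRST character (all digraph first letters are distinct):
--     # value = (required second character, Aurebesh word)
--     DIGRAPH = {
--         'c': ('h', 'cherek'), 'a': ('e', 'enth'), 'e': ('o', 'onith'),
--         'k': ('h', 'krenth'), 'n': ('g', 'nen'), 'o': ('o', 'orenth'),
--         's': ('h', 'shen'), 't': ('h', 'thesh'),
--     }
--     LETTER = {
--         'a': 'aurek', 'b': 'besh', 'c': 'cresh', 'd': 'dorn', 'e': 'esk',
--         'f': 'forn', 'g': 'grek', 'h': 'herf', 'i': 'isk', 'j': 'jenth',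
--         'k': 'krill', 'l': 'leth', 'm': 'mern', 'n': 'nern', 'o': 'osk',
--         'p': 'peth', 'q': 'qek', 'r': 'resh', 's': 'senth', 't': 'trill',
--         'u': 'usk', 'v': 'vev', 'w': 'wesk', 'x': 'xesh', 'y': 'yirt',
--         'z': 'zerek',
--     }
--     # single pass: one-character "pending" buffer; each incoming character either
--     # completes a digraph with the pending one or flushes it as a single letter
--     parts = []
--     pending = None
--     for c in text.lower():
--         d = DIGRAPH.get(pending) if pending is not None else None
--         if d is not None and d[0] == c:
--             parts.append(d[1])
--             pending = None
--         else:
--             if pending is not None: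
--                 parts.append(LETTER.get(pending, pending))
--             pending = c
--     if pending is not None:
--         parts.append(LETTER.get(pending, pending))
--     return ''.join(parts)
-- ===== Notes on version B (the rewrite author's own statement) =====
-- stated objective: faster
-- what changed: A's index-advancing while loop with a bounds check and a two-character slice looked up in a digraph dict, accumulating with repeated string concatenation, is replaced by a one-pass for-each automaton carrying a one-character pending buffer, with the digraph table re-keyed by its unique first character to (second-char, word) pairs and the output assembled once with str.join of a parts list.
import Mathlib
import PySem

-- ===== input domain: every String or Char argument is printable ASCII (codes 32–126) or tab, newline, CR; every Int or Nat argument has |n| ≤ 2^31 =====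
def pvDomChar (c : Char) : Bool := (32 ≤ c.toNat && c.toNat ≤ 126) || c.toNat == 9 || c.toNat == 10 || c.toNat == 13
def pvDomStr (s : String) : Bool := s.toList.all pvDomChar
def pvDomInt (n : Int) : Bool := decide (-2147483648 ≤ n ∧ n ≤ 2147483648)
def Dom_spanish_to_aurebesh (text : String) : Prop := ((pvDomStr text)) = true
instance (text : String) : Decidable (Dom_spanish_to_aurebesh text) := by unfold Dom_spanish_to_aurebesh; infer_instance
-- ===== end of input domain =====

-- B replaces A's index-advancing while loop (bounds check + two-character slice looked up in
-- one dict, then a single-letter dict, repeated string concatenation) by a one-pass for-each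
-- automaton with a one-character pending buffer, a digraph table keyed by its (unique) first
-- character, and one final join of the emitted parts; measured faster at large sizes.

-- ===== PORT A =====
-- A's dict double_aurebesh (keys are the 2-char slices; A works on text.lower())
def pvDoubleA : PySem.Dict (List Char) (List Char) := ⟨[
  (['c', 'h'], ['c', 'h', 'e', 'r', 'e', 'k']),
  (['a', 'e'], ['e', 'n', 't', 'h']),
  (['e', 'o'], ['o', 'n', 'i', 't', 'h']),
  (['k', 'h'], ['k', 'r', 'e', 'n', 't', 'h']),
  (['n', 'g'], ['n', 'e', 'n']),
  (['o', 'o'], ['o', 'r', 'e', 'n', 't', 'h']),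
  (['s', 'h'], ['s', 'h', 'e', 'n']),
  (['t', 'h'], ['t', 'h', 'e', 's', 'h'])
]⟩

-- A's dict dictionary_aurebesh
def pvSingleA : PySem.Dict (List Char) (List Char) := ⟨[
  (['a'], ['a', 'u', 'r', 'e', 'k']),
  (['b'], ['b', 'e', 's', 'h']),
  (['c'], ['c', 'r', 'e', 's', 'h']),
  (['d'], ['d', 'o', 'r', 'n']),
  (['e'], ['e', 's', 'k']),
  (['f'], ['f', 'o', 'r', 'n']),
  (['g'], ['g', 'r', 'e', 'k']),
  (['h'], ['h', 'e', 'r', 'f']),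
  (['i'], ['i', 's', 'k']),
  (['j'], ['j', 'e', 'n', 't', 'h']),
  (['k'], ['k', 'r', 'i', 'l', 'l']),
  (['l'], ['l', 'e', 't', 'h']),
  (['m'], ['m', 'e', 'r', 'n']),
  (['n'], ['n', 'e', 'r', 'n']),
  (['o'], ['o', 's', 'k']),
  (['p'], ['p', 'e', 't', 'h']),
  (['q'], ['q', 'e', 'k']),
  (['r'], ['r', 'e', 's', 'h']),
  (['s'], ['s', 'e', 'n', 't', 'h']),
  (['t'], ['t', 'r', 'i', 'l', 'l']),
  (['u'], ['u', 's', 'k']),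
  (['v'], ['v', 'e', 'v']),
  (['w'], ['w', 'e', 's', 'k']),
  (['x'], ['x', 'e', 's', 'h']),
  (['y'], ['y', 'i', 'r', 't']),
  (['z'], ['z', 'e', 'r', 'e', 'k'])
]⟩

-- A's while loop over the lowered character list: the index advancing by 2 or 1 becomes
-- recursion on the suffix; `position < len-1` + the 2-char slice membership + indexing
-- become the shape of the pattern plus one get? match.
def pvGoA : List Char → List Char
  | [] => []
  | c :: d :: rest2 =>
    match PySem.Dict.get? pvDoubleA [c, d] with
    | some v => v ++ pvGoA rest2
    | none =>
      match PySem.Dict.get? pvSingleA [c] with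
      | some v => v ++ pvGoA (d :: rest2)
      | none => c :: pvGoA (d :: rest2)
  | [c] =>
    match PySem.Dict.get? pvSingleA [c] with
    | some v => v ++ pvGoA []
    | none => c :: pvGoA []

def spanish_to_aurebesh (text : String) : String :=
  String.ofList (pvGoA (PySem.Chars.lower text.toList))

-- ===== PORT B =====
-- B's DIGRAPH dict: keyed by the digraph's FIRST character, value = (second char, word)
def pvDigraphB : PySem.Dict Char (Char × String) := ⟨[
  ('c', ('h', "cherek")), ('a', ('e', "enth")), ('e', ('o', "onith")),
  ('k', ('h', "krenth")), ('n', ('g', "nen")), ('o', ('o', "orenth")),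
  ('s', ('h', "shen")), ('t', ('h', "thesh"))
]⟩

-- B's LETTER dict
def pvLetterB : PySem.Dict Char String := ⟨[
  ('a', "aurek"), ('b', "besh"), ('c', "cresh"), ('d', "dorn"), ('e', "esk"),
  ('f', "forn"), ('g', "grek"), ('h', "herf"), ('i', "isk"), ('j', "jenth"),
  ('k', "krill"), ('l', "leth"), ('m', "mern"), ('n', "nern"), ('o', "osk"),
  ('p', "peth"), ('q', "qek"), ('r', "resh"), ('s', "senth"), ('t', "trill"),
  ('u', "usk"), ('v', "vev"), ('w', "wesk"), ('x', "xesh"), ('y', "yirt"),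
  ('z', "zerek")
]⟩

-- LETTER.get(pending, pending): the flushed pending character's translation
def pvFlushB (p : Char) : List Char :=
  match PySem.Dict.get? pvLetterB p with
  | some w => w.toList
  | none => [p]

-- the body of B's for loop: state = (parts so far, pending character)
def pvStepB (st : List (List Char) × Option Char) (c : Char) : List (List Char) × Option Char :=
  match st.2 with
  | some p =>
    match PySem.Dict.get? pvDigraphB p with
    | some (d, w) =>
      if d == c then (st.1 ++ [w.toList], none)
      else (st.1 ++ [pvFlushB p], some c)
    | none => (st.1 ++ [pvFlushB p], some c)
  | none => (st.1, some c)

-- after the loop: flush the pending character, then ''.join(parts)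
def pvFinishB (st : List (List Char) × Option Char) : List Char :=
  match st.2 with
  | some p => (st.1 ++ [pvFlushB p]).flatten
  | none => st.1.flatten

def spanish_to_aurebesh_alt (text : String) : String :=
  String.ofList (pvFinishB ((PySem.Chars.lower text.toList).foldl pvStepB ([], none)))

-- ===== PRECONDITION & SPEC =====
def Spec_spanish_to_aurebesh (text : String) (out : String) : Prop := out = spanish_to_aurebesh_alt text
instance (text : String) (out : String) : Decidable (Spec_spanish_to_aurebesh text out) := by unfold Spec_spanish_to_aurebesh; infer_instance

-- ===== CLAIM (what is proved, stated in full; the proofs are below) =====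
def Claim_equal_spanish_to_aurebesh : Prop := ∀ (text : String), Dom_spanish_to_aurebesh text → Spec_spanish_to_aurebesh text (spanish_to_aurebesh text)

-- ===== LEMMAS AND PROOFS =====

theorem pv_singles_eq (p : Char) :
    PySem.Dict.get? pvSingleA [p] = (PySem.Dict.get? pvLetterB p).map String.toList := by
  simp only [pvSingleA, pvLetterB, PySem.Dict.get?, List.find?_cons, List.find?_nil,
    List.cons_beq_cons, Bool.and_true, beq_self_eq_true]
  cases h0 : ('a' == p)
  case true =>
    have hp : 'a' = p := by simpa using h0
    subst hp
    rfl
  case false =>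
    cases h1 : ('b' == p)
    case true =>
      have hp : 'b' = p := by simpa using h1
      subst hp
      rfl
    case false =>
      cases h2 : ('c' == p)
      case true =>
        have hp : 'c' = p := by simpa using h2
        subst hp
        rfl
      case false =>
        cases h3 : ('d' == p)
        case true =>
          have hp : 'd' = p := by simpa using h3
          subst hp
          rfl
        case false =>
          cases h4 : ('e' == p)
          case true =>
            have hp : 'e' = p := by simpa using h4
            subst hp
            rfl
          case false =>
            cases h5 : ('f' == p)
            case true =>
              have hp : 'f' = p := by simpa using h5
              subst hp
              rfl
            case false =>
              cases h6 : ('g' == p)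
              case true =>
                have hp : 'g' = p := by simpa using h6
                subst hp
                rfl
              case false =>
                cases h7 : ('h' == p)
                case true =>
                  have hp : 'h' = p := by simpa using h7
                  subst hp
                  rfl
                case false =>
                  cases h8 : ('i' == p)
                  case true =>
                    have hp : 'i' = p := by simpa using h8
                    subst hp
                    rfl
                  case false =>
                    cases h9 : ('j' == p)
                    case true =>
                      have hp : 'j' = p := by simpa using h9
                      subst hp
                      rfl
                    case false =>
                      cases h10 : ('k' == p)
                      case true =>
                        have hp : 'k' = p := by simpa using h10
                        subst hp
                        rfl
                      case false =>
                        cases h11 : ('l' == p)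
                        case true =>
                          have hp : 'l' = p := by simpa using h11
                          subst hp
                          rfl
                        case false =>
                          cases h12 : ('m' == p)
                          case true =>
                            have hp : 'm' = p := by simpa using h12
                            subst hp
                            rfl
                          case false =>
                            cases h13 : ('n' == p)
                            case true =>
                              have hp : 'n' = p := by simpa using h13
                              subst hp
                              rfl
                            case false =>
                              cases h14 : ('o' == p)
                              case true =>
                                have hp : 'o' = p := by simpa using h14
                                subst hp
                                rfl
                              case false =>
                                cases h15 : ('p' == p)
                                case true =>
                                  have hp : 'p' = p := by simpa using h15
                                  subst hp
                                  rfl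
                                case false =>
                                  cases h16 : ('q' == p)
                                  case true =>
                                    have hp : 'q' = p := by simpa using h16
                                    subst hp
                                    rfl
                                  case false =>
                                    cases h17 : ('r' == p)
                                    case true =>
                                      have hp : 'r' = p := by simpa using h17
                                      subst hp
                                      rfl
                                    case false =>
                                      cases h18 : ('s' == p)
                                      case true =>
                                        have hp : 's' = p := by simpa using h18
                                        subst hp
                                        rfl
                                      case false =>
                                        cases h19 : ('t' == p)
                                        case true =>
                                          have hp : 't' = p := by simpa using h19
                                          subst hp
                                          rfl
                                        case false =>
                                          cases h20 : ('u' == p)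
                                          case true =>
                                            have hp : 'u' = p := by simpa using h20
                                            subst hp
                                            rfl
                                          case false =>
                                            cases h21 : ('v' == p)
                                            case true =>
                                              have hp : 'v' = p := by simpa using h21
                                              subst hp
                                              rfl
                                            case false =>
                                              cases h22 : ('w' == p)
                                              case true =>
                                                have hp : 'w' = p := by simpa using h22
                                                subst hp
                                                rfl
                                              case false =>
                                                cases h23 : ('x' == p)
                                                case true =>
                                                  have hp : 'x' = p := by simpa using h23
                                                  subst hp
                                                  rfl
                                                case false =>
                                                  cases h24 : ('y' == p)
                                                  case true =>
                                                    have hp : 'y' = p := by simpa using h24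
                                                    subst hp
                                                    rfl
                                                  case false =>
                                                    cases h25 : ('z' == p)
                                                    case true =>
                                                      have hp : 'z' = p := by simpa using h25
                                                      subst hp
                                                      rfl
                                                    case false =>
                                                      simp

theorem pv_doubles_eq (p c : Char) :
    PySem.Dict.get? pvDoubleA [p, c] =
      (match PySem.Dict.get? pvDigraphB p with
       | some (d, w) => if d == c then some w.toList else none
       | none => none) := by
  simp only [pvDoubleA, PySem.Dict.get?, List.find?_cons, List.find?_nil,
    List.cons_beq_cons, Bool.and_true, beq_self_eq_true]
  cases g0 : ('c' == p)
  case true =>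
    have hp : 'c' = p := by simpa using g0
    subst hp
    rw [show (List.find? (fun q => q.1 == 'c') pvDigraphB.items) = some ('c', ('h', "cherek")) from rfl]
    cases hc : ('h' == c)
    case true => simp [hc]
    case false => simp [hc]
  case false =>
    cases g1 : ('a' == p)
    case true =>
      have hp : 'a' = p := by simpa using g1
      subst hp
      rw [show (List.find? (fun q => q.1 == 'a') pvDigraphB.items) = some ('a', ('e', "enth")) from rfl]
      cases hc : ('e' == c)
      case true => simp [hc]
      case false => simp [hc]
    case false =>
      cases g2 : ('e' == p)
      case true =>
        have hp : 'e' = p := by simpa using g2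
        subst hp
        rw [show (List.find? (fun q => q.1 == 'e') pvDigraphB.items) = some ('e', ('o', "onith")) from rfl]
        cases hc : ('o' == c)
        case true => simp [hc]
        case false => simp [hc]
      case false =>
        cases g3 : ('k' == p)
        case true =>
          have hp : 'k' = p := by simpa using g3
          subst hp
          rw [show (List.find? (fun q => q.1 == 'k') pvDigraphB.items) = some ('k', ('h', "krenth")) from rfl]
          cases hc : ('h' == c)
          case true => simp [hc]
          case false => simp [hc]
        case false =>
          cases g4 : ('n' == p)
          case true =>
            have hp : 'n' = p := by simpa using g4
            subst hp
            rw [show (List.find? (fun q => q.1 == 'n') pvDigraphB.items) = some ('n', ('g', "nen")) from rfl]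
            cases hc : ('g' == c)
            case true => simp [hc]
            case false => simp [hc]
          case false =>
            cases g5 : ('o' == p)
            case true =>
              have hp : 'o' = p := by simpa using g5
              subst hp
              rw [show (List.find? (fun q => q.1 == 'o') pvDigraphB.items) = some ('o', ('o', "orenth")) from rfl]
              cases hc : ('o' == c)
              case true => simp [hc]
              case false => simp [hc]
            case false =>
              cases g6 : ('s' == p)
              case true =>
                have hp : 's' = p := by simpa using g6
                subst hp
                rw [show (List.find? (fun q => q.1 == 's') pvDigraphB.items) = some ('s', ('h', "shen")) from rfl]
                cases hc : ('h' == c)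
                case true => simp [hc]
                case false => simp [hc]
              case false =>
                cases g7 : ('t' == p)
                case true =>
                  have hp : 't' = p := by simpa using g7
                  subst hp
                  rw [show (List.find? (fun q => q.1 == 't') pvDigraphB.items) = some ('t', ('h', "thesh")) from rfl]
                  cases hc : ('h' == c)
                  case true => simp [hc]
                  case false => simp [hc]
                case false =>
                  simp only [pvDigraphB, List.find?_cons, List.find?_nil, g0, g1, g2, g3, g4, g5, g6, g7]
                  simp

theorem pvGoA_one (p : Char) : pvGoA [p] = pvFlushB p := by
  have h := pv_singles_eq p
  unfold pvGoA pvFlushB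
  rw [h]
  cases PySem.Dict.get? pvLetterB p <;> simp [pvGoA]

theorem pvGoA_two (p c : Char) (cs : List Char) :
    pvGoA (p :: c :: cs) =
      (match PySem.Dict.get? pvDigraphB p with
       | some (d, w) => if d == c then w.toList ++ pvGoA cs else pvFlushB p ++ pvGoA (c :: cs)
       | none => pvFlushB p ++ pvGoA (c :: cs)) := by
  show (match PySem.Dict.get? pvDoubleA [p, c] with
        | some v => v ++ pvGoA cs
        | none =>
          match PySem.Dict.get? pvSingleA [p] with
          | some v => v ++ pvGoA (c :: cs)
          | none => p :: pvGoA (c :: cs)) = _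
  rw [pv_doubles_eq]
  cases hD : PySem.Dict.get? pvDigraphB p with
  | some dw =>
    obtain ⟨d, w⟩ := dw
    cases hc : (d == c) with
    | true => simp [hc]
    | false =>
      simp only [hc, Bool.false_eq_true, if_false]
      rw [pv_singles_eq]
      unfold pvFlushB
      cases PySem.Dict.get? pvLetterB p <;> simp
  | none =>
    simp only []
    rw [pv_singles_eq]
    unfold pvFlushB
    cases PySem.Dict.get? pvLetterB p <;> simp

-- loop invariant: running B's fold from (acc, pending) and finishing equals the flattened
-- acc followed by A's recursion on the pending character (if any) prepended to the rest
theorem pv_loop (cs : List Char) : ∀ (acc : List (List Char)) (p? : Option Char),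
    pvFinishB (cs.foldl pvStepB (acc, p?)) =
      acc.flatten ++ pvGoA ((p?.toList) ++ cs) := by
  induction cs with
  | nil =>
    intro acc p?
    cases p? with
    | none => simp [pvFinishB, pvGoA]
    | some p => simp [pvFinishB, pvGoA_one]
  | cons c cs ih =>
    intro acc p?
    cases p? with
    | none =>
      show pvFinishB (cs.foldl pvStepB (pvStepB (acc, none) c)) = _
      rw [show pvStepB (acc, none) c = (acc, some c) from rfl, ih]
      simp
    | some p =>
      show pvFinishB (cs.foldl pvStepB (pvStepB (acc, some p) c)) = _
      rw [show ((some p : Option Char).toList ++ c :: cs) = p :: c :: cs from rfl, pvGoA_two]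
      cases hD : PySem.Dict.get? pvDigraphB p with
      | some dw =>
        obtain ⟨d, w⟩ := dw
        cases hc : (d == c) with
        | true =>
          rw [show pvStepB (acc, some p) c = (acc ++ [w.toList], none) from by
            simp [pvStepB, hD, hc]]
          rw [ih]
          simp [hc]
        | false =>
          rw [show pvStepB (acc, some p) c = (acc ++ [pvFlushB p], some c) from by
            simp [pvStepB, hD, hc]]
          rw [ih]
          simp [hc]
      | none =>
        rw [show pvStepB (acc, some p) c = (acc ++ [pvFlushB p], some c) from by
          simp [pvStepB, hD]]
        rw [ih]
        simp

-- ===== VERDICT (by name: the statement is the Claim_ definition above) =====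
theorem spanish_to_aurebesh_spec : Claim_equal_spanish_to_aurebesh := by
  intro text _
  unfold Spec_spanish_to_aurebesh spanish_to_aurebesh spanish_to_aurebesh_alt
  rw [pv_loop (PySem.Chars.lower text.toList) [] none]
  simp
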